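-- pv_equiv track=rewrite | github.com/moonlight035/algorithm | lcp/lcp13.py | dfs
-- ===== SOURCE A (Python) =====
-- from typing import List, Tuple
--
-- def dfs(maze: List[str], stone: List[Tuple]) -> List[List[List[int]]]:
--     lx = len(maze)
--     ly = len(maze[0])
--     direction = [(0,1),(1,0),(0,-1),(-1,0)]
--     res = []
--     for i in stone:
--         next = [i]
--         dis = [[-1]*ly for _ in range(lx)]
--         base = 1
--         while next:
--             temp = []
--             for t in next:
--                 for d in direction:
--                     nextX, nextY = t[0] + d[0], t[1] + d[1]
--                     if nextX >= 0 and nextX < lx and nextY >= 0 and nextY < ly \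
--                             and dis[nextX][nextY] == -1 and maze[nextX][nextY] != '#':
--                         dis[nextX][nextY] = base
--                         temp.append((nextX, nextY))
--             base += 1
--             next = temp
--         res.append(dis)
--     return res
-- ===== SOURCE B (Python) =====
-- from typing import List, Tuple
--
-- def dfs(maze: List[str], stone: List[Tuple]) -> List[List[List[int]]]:
--     # frontier-free BFS: level-synchronous grid relaxation, one functional sweep per level
--     lx, ly = len(maze), len(maze[0])
--     dirs = ((0, 1), (1, 0), (0, -1), (-1, 0))
--
--     def grid(s):
--         dis = [[-1] * ly for _ in range(lx)]
--         k = 1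
--         while True:
--             new = [[k if dis[x][y] == -1 and maze[x][y] != '#' and
--                         any((k == 1 and x + dx == s[0] and y + dy == s[1])
--                             or (0 <= x + dx < lx and 0 <= y + dy < ly
--                                 and dis[x + dx][y + dy] == k - 1)
--                             for dx, dy in dirs)
--                     else dis[x][y]
--                     for y in range(ly)]
--                    for x in range(lx)]
--             if new == dis:
--                 break
--             dis = new
--             k += 1
--         return dis
--
--     return [grid(s) for s in stone]
-- ===== Notes on version B (the rewrite author's own statement) =====
-- stated objective: alternative
-- what changed: Replaces the frontier-based BFS (per-level frontier lists expanded via an inner direction loop) by frontier-free level-synchronous grid relaxation: each round k functionally rebuilds the whole grid, marking k every still-unset open cell that has a neighbour at distance k-1 (the source at k=1), and stops when a sweep changes nothing, so no frontier/queue data structure exists at all.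
-- outside the precondition, e.g. on dfs(['a#', '#'], [(0, 0)]): A returns [[[-1, -1], [-1, -1]]], B raises IndexError
import Mathlib
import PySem

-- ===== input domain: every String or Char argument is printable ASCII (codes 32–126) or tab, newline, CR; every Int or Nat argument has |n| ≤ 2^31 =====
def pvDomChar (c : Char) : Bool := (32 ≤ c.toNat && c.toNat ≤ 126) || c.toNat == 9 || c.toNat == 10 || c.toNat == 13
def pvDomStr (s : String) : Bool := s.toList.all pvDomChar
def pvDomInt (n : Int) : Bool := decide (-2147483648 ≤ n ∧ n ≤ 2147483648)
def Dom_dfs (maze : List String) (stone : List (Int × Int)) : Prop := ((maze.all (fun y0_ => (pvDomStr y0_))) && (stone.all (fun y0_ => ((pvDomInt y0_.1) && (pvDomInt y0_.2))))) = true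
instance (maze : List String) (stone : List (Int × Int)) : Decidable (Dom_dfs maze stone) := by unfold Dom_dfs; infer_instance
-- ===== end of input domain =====

-- B replaces A's frontier-based BFS (per-level frontier lists expanded through an inner
-- direction loop) by frontier-free level-synchronous grid relaxation: round k rebuilds the
-- whole grid, marking k every unset open cell with a neighbour at distance k-1 (the source
-- at k=1), stopping when a sweep changes nothing; no frontier/queue structure exists in B.

-- ===== PORT A =====
def pvDirs : List (Int × Int) := [(0, 1), (1, 0), (0, -1), (-1, 0)]

def pvGet (g : List (List Int)) (x y : Int) : Int :=
  (g.getD x.toNat []).getD y.toNat 0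

def pvSet (g : List (List Int)) (x y : Int) (v : Int) : List (List Int) :=
  g.set x.toNat ((g.getD x.toNat []).set y.toNat v)

def pvMazeGet (maze : List String) (x y : Int) : Char :=
  (maze.getD x.toNat "").toList.getD y.toNat '#'

-- number of still-unvisited (= -1) cells; termination measure of A's level loop
def pvUnvis (g : List (List Int)) : Nat := (g.map (fun r => r.count (-1))).sum

-- one direction step of A's inner 'for d in direction' loop
def pvExpandStep (lx ly : Int) (maze : List String) (v : Int)
    (t : Int × Int) (st : List (List Int) × List (Int × Int)) (d : Int × Int) :
    List (List Int) × List (Int × Int) :=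
  let nx := t.1 + d.1
  let ny := t.2 + d.2
  if 0 ≤ nx ∧ nx < lx ∧ 0 ≤ ny ∧ ny < ly ∧ pvGet st.1 nx ny = -1 ∧ pvMazeGet maze nx ny ≠ '#'
  then (pvSet st.1 nx ny v, st.2 ++ [(nx, ny)])
  else st

def pvExpand (lx ly : Int) (maze : List String) (v : Int)
    (t : Int × Int) (st : List (List Int) × List (Int × Int)) :
    List (List Int) × List (Int × Int) :=
  pvDirs.foldl (pvExpandStep lx ly maze v t) st

-- ----- termination lemmas for A's loop (cited by its decreasing_by, hence above it) -----

theorem pv_count_set_ne : ∀ (r : List Int) (j : Nat) (v : Int),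
    r.getD j 0 = -1 → v ≠ -1 → (r.set j v).count (-1) + 1 = r.count (-1) := by
  intro r
  induction r with
  | nil => intro j v h _; simp at h
  | cons a r ih =>
    intro j v h hv
    cases j with
    | zero =>
      simp at h
      subst h
      simp [hv]
    | succ j =>
      simp only [List.getD] at h
      have := ih j v (by simpa using h) hv
      simp only [List.set, List.count_cons]
      omega

theorem pv_unvis_set_row : ∀ (g : List (List Int)) (i : Nat) (r : List Int),
    i < g.length →
    pvUnvis (g.set i r) + (g.getD i []).count (-1) = pvUnvis g + r.count (-1) := by
  intro g
  induction g with
  | nil => intro i r h; simp at h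
  | cons a g ih =>
    intro i r h
    cases i with
    | zero =>
      simp only [List.set_cons_zero, pvUnvis, List.map_cons, List.sum_cons, List.getD_cons_zero]
      omega
    | succ i =>
      have := ih i r (by simpa using h)
      simp only [List.set_cons_succ, pvUnvis, List.map_cons, List.sum_cons, List.getD_cons_succ] at this ⊢
      omega

theorem pv_set_unvis (g : List (List Int)) (x y : Int) (v : Int)
    (hget : pvGet g x y = -1) (hv : v ≠ -1) :
    pvUnvis (pvSet g x y v) + 1 = pvUnvis g := by
  have hi : x.toNat < g.length := by
    by_contra hc
    have : g.getD x.toNat [] = [] := by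
      rw [List.getD_eq_getElem?_getD, List.getElem?_eq_none (by omega)]
      rfl
    rw [pvGet, this] at hget
    simp at hget
  have h1 := pv_unvis_set_row g x.toNat ((g.getD x.toNat []).set y.toNat v) hi
  have h2 := pv_count_set_ne (g.getD x.toNat []) y.toNat v hget hv
  rw [pvSet]
  omega

theorem pv_step_measure (lx ly : Int) (maze : List String) (v : Int)
    (t : Int × Int) (st : List (List Int) × List (Int × Int)) (d : Int × Int)
    (hv : v ≠ -1) :
    pvUnvis (pvExpandStep lx ly maze v t st d).1 + (pvExpandStep lx ly maze v t st d).2.length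
      = pvUnvis st.1 + st.2.length := by
  rw [pvExpandStep]
  split_ifs with h
  · have := pv_set_unvis st.1 (t.1 + d.1) (t.2 + d.2) v h.2.2.2.2.1 hv
    simp only [List.length_append, List.length_cons, List.length_nil]
    omega
  · rfl

theorem pv_foldl_step_measure (lx ly : Int) (maze : List String) (v : Int)
    (t : Int × Int) (hv : v ≠ -1) :
    ∀ (ds : List (Int × Int)) (st : List (List Int) × List (Int × Int)),
      pvUnvis (ds.foldl (pvExpandStep lx ly maze v t) st).1
        + (ds.foldl (pvExpandStep lx ly maze v t) st).2.length
      = pvUnvis st.1 + st.2.length := by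
  intro ds
  induction ds with
  | nil => intro st; rfl
  | cons d ds ih =>
    intro st
    rw [List.foldl_cons, ih]
    exact pv_step_measure lx ly maze v t st d hv

theorem pv_expand_measure (lx ly : Int) (maze : List String) (v : Int)
    (t : Int × Int) (st : List (List Int) × List (Int × Int)) (hv : v ≠ -1) :
    pvUnvis (pvExpand lx ly maze v t st).1 + (pvExpand lx ly maze v t st).2.length
      = pvUnvis st.1 + st.2.length :=
  pv_foldl_step_measure lx ly maze v t hv pvDirs st

theorem pv_foldl_expand_measure (lx ly : Int) (maze : List String) (v : Int) (hv : v ≠ -1) :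
    ∀ (l : List (Int × Int)) (st : List (List Int) × List (Int × Int)),
      pvUnvis (l.foldl (fun st t => pvExpand lx ly maze v t st) st).1
        + (l.foldl (fun st t => pvExpand lx ly maze v t st) st).2.length
      = pvUnvis st.1 + st.2.length := by
  intro l
  induction l with
  | nil => intro st; rfl
  | cons t l ih =>
    intro st
    rw [List.foldl_cons, ih]
    exact pv_expand_measure lx ly maze v t st hv

-- A's inner two nested 'for' loops: one whole level expanded, temp collected
def dfsLevel (lx ly : Int) (maze : List String) (base : Nat)
    (dis : List (List Int)) (next : List (Int × Int)) :
    List (List Int) × List (Int × Int) :=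
  next.foldl (fun st t => pvExpand lx ly maze (base : Int) t st) (dis, [])

-- A's 'while next:' level loop; base carried as Nat (it is 1,2,3,… in A)
def dfsLoop (lx ly : Int) (maze : List String) (dis : List (List Int))
    (next : List (Int × Int)) (base : Nat) : List (List Int) :=
  if h : next = [] then dis
  else
    let p := dfsLevel lx ly maze base dis next
    dfsLoop lx ly maze p.1 p.2 (base + 1)
termination_by pvUnvis dis + next.length
decreasing_by
  have hm := pv_foldl_expand_measure lx ly maze (base : Int) (by omega) next (dis, [])
  have hn : 0 < next.length := List.length_pos_of_ne_nil h
  simp only [List.length_nil] at hm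
  simp only [dfsLevel]
  omega

-- maze[0] raises on an empty maze (excluded by Pre_dfs); headD is exact otherwise
def dfs (maze : List String) (stone : List (Int × Int)) : List (List (List Int)) :=
  let lx : Int := maze.length
  let ly : Int := (maze.headD "").length
  stone.foldl (fun res i =>
    res ++ [dfsLoop lx ly maze
      (List.replicate maze.length (List.replicate (maze.headD "").length (-1))) [i] 1]) []

-- ===== PORT B =====
def bDirs : List (Int × Int) := [(0, 1), (1, 0), (0, -1), (-1, 0)]

def bCell (dis : List (List Int)) (x y : Nat) : Int := (dis.getD x []).getD y 0

-- dis[ux][uy] for an Int coordinate, read only under the 0 ≤ _ < l guards where it is exact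
def bCellI (dis : List (List Int)) (x y : Int) : Int := bCell dis x.toNat y.toNat

def bMazeCell (maze : List String) (x y : Nat) : Char := (maze.getD x "").toList.getD y '#'

-- the condition of B's comprehension: unset, open, and some neighbour is the source (k=1)
-- or carries distance k-1
def bCond (lx ly : Int) (maze : List String) (s : Int × Int) (dis : List (List Int))
    (k : Nat) (x y : Nat) : Bool :=
  bCell dis x y == -1 && bMazeCell maze x y != '#' &&
  bDirs.any (fun d =>
    (k == 1 && (x : Int) + d.1 == s.1 && (y : Int) + d.2 == s.2) ||
    (decide (0 ≤ (x : Int) + d.1) && decide ((x : Int) + d.1 < lx) &&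
     decide (0 ≤ (y : Int) + d.2) && decide ((y : Int) + d.2 < ly) &&
     bCellI dis ((x : Int) + d.1) ((y : Int) + d.2) == (k : Int) - 1))

-- one functional sweep: the 'new = [[ … ]]' double comprehension
def bSweep (lx ly : Int) (maze : List String) (s : Int × Int) (dis : List (List Int))
    (k : Nat) : List (List Int) :=
  (List.range lx.toNat).map (fun x =>
    (List.range ly.toNat).map (fun y =>
      if bCond lx ly maze s dis k x y then (k : Int) else bCell dis x y))

-- ----- termination machinery for B's 'while True' loop (cited by its decreasing_by) -----
def bWin (lx ly : Int) (dis : List (List Int)) : Nat :=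
  ∑ x ∈ Finset.range lx.toNat, (List.range ly.toNat).countP (fun y => bCell dis x y == -1)

def bShape (lx ly : Int) (dis : List (List Int)) : Bool :=
  dis.length == lx.toNat && dis.all (fun r => r.length == ly.toNat)

def bMeasure (lx ly : Int) (dis : List (List Int)) : Nat :=
  2 * bWin lx ly dis + (if bShape lx ly dis then 0 else 1)

theorem bCell_eq_getElem (a : List (List Int)) (x y : Nat)
    (hx : x < a.length) (hy : y < (a[x]'hx).length) : bCell a x y = (a[x]'hx)[y]'hy := by
  simp [bCell, List.getD_eq_getElem?_getD, hx, hy]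

theorem gridExt (n m : Nat) (a b : List (List Int))
    (ha : a.length = n) (hb : b.length = n)
    (har : ∀ r ∈ a, r.length = m) (hbr : ∀ r ∈ b, r.length = m)
    (h : ∀ x, x < n → ∀ y, y < m → bCell a x y = bCell b x y) : a = b := by
  apply List.ext_getElem (by omega)
  intro x h1 h2
  have hra := har (a[x]'h1) (List.getElem_mem h1)
  have hrb := hbr (b[x]'h2) (List.getElem_mem h2)
  apply List.ext_getElem (by omega)
  intro y hy1 hy2
  rw [← bCell_eq_getElem a x y h1 hy1, ← bCell_eq_getElem b x y h2 hy2]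
  exact h x (by omega) y (by omega)

theorem getD_map_range {α : Type} (n : Nat) (f : Nat → α) (x : Nat) (hx : x < n) (d : α) :
    ((List.range n).map f).getD x d = f x := by
  rw [List.getD_eq_getElem?_getD]
  simp [hx]

theorem bCell_sweep (lx ly : Int) (maze : List String) (s : Int × Int)
    (dis : List (List Int)) (k : Nat) (x y : Nat)
    (hx : x < lx.toNat) (hy : y < ly.toNat) :
    bCell (bSweep lx ly maze s dis k) x y
      = if bCond lx ly maze s dis k x y then (k : Int) else bCell dis x y := by
  rw [bSweep, bCell, getD_map_range _ _ _ hx, getD_map_range _ _ _ hy]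

theorem countP_lt_of {α : Type} (p q : α → Bool) (l : List α)
    (h : ∀ b ∈ l, p b = true → q b = true) (a : α) (ha : a ∈ l)
    (hp : p a = false) (hq : q a = true) : l.countP p < l.countP q := by
  induction l with
  | nil => simp at ha
  | cons b l ih =>
    have hmono : (if p b then 1 else 0) ≤ (if q b then 1 else 0) := by
      by_cases hb : p b = true
      · simp [hb, h b List.mem_cons_self hb]
      · simp only [Bool.not_eq_true] at hb
        simp [hb]
    rw [List.countP_cons, List.countP_cons]
    rcases List.mem_cons.1 ha with rfl | ha'
    · have h1 : l.countP p ≤ l.countP q :=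
        List.countP_mono_left (fun c hc => h c (List.mem_cons_of_mem _ hc))
      simp [hp, hq]
      omega
    · have h2 := ih (fun c hc hpc => h c (List.mem_cons_of_mem _ hc) hpc) ha'
      omega

theorem bWin_sweep_lt (lx ly : Int) (maze : List String) (s : Int × Int)
    (dis : List (List Int)) (k : Nat) (x y : Nat) (hx : x < lx.toNat) (hy : y < ly.toNat)
    (hc : bCond lx ly maze s dis k x y = true) :
    bWin lx ly (bSweep lx ly maze s dis k) < bWin lx ly dis := by
  apply Finset.sum_lt_sum
  · intro i him
    have hi := Finset.mem_range.1 him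
    apply List.countP_mono_left
    intro y' hym hpy
    have hy' := List.mem_range.1 hym
    rw [bCell_sweep lx ly maze s dis k i y' hi hy'] at hpy
    by_cases hcc : bCond lx ly maze s dis k i y' = true
    · rw [if_pos hcc] at hpy
      simp at hpy
    · rw [if_neg hcc] at hpy
      exact hpy
  · refine ⟨x, Finset.mem_range.2 hx, ?_⟩
    apply countP_lt_of _ _ _ ?_ y (List.mem_range.2 hy)
    · rw [bCell_sweep lx ly maze s dis k x y hx hy, if_pos hc]
      simp
    · have h1 : bCell dis x y = -1 := by
        have := hc
        rw [bCond] at this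
        simp only [Bool.and_eq_true, beq_iff_eq] at this
        exact this.1.1
      simp [h1]
    · intro y' hym hpy
      have hy' := List.mem_range.1 hym
      rw [bCell_sweep lx ly maze s dis k x y' hx hy'] at hpy
      by_cases hcc : bCond lx ly maze s dis k x y' = true
      · rw [if_pos hcc] at hpy
        simp at hpy
      · rw [if_neg hcc] at hpy
        exact hpy

theorem bShape_sweep (lx ly : Int) (maze : List String) (s : Int × Int)
    (dis : List (List Int)) (k : Nat) :
    bShape lx ly (bSweep lx ly maze s dis k) = true := by
  simp [bShape, bSweep, List.all_eq_true]

theorem bSweep_rows (lx ly : Int) (maze : List String) (s : Int × Int)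
    (dis : List (List Int)) (k : Nat) :
    ∀ r ∈ bSweep lx ly maze s dis k, r.length = ly.toNat := by
  intro r hr
  rw [bSweep] at hr
  obtain ⟨x, _, rfl⟩ := List.mem_map.1 hr
  simp

theorem bSweep_len (lx ly : Int) (maze : List String) (s : Int × Int)
    (dis : List (List Int)) (k : Nat) :
    (bSweep lx ly maze s dis k).length = lx.toNat := by
  simp [bSweep]

theorem bSweep_eq_self (lx ly : Int) (maze : List String) (s : Int × Int)
    (dis : List (List Int)) (k : Nat) (hsh : bShape lx ly dis = true)
    (h : ∀ x, x < lx.toNat → ∀ y, y < ly.toNat → bCond lx ly maze s dis k x y = false) :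
    bSweep lx ly maze s dis k = dis := by
  rw [bShape, Bool.and_eq_true, beq_iff_eq, List.all_eq_true] at hsh
  obtain ⟨hlen, hrows⟩ := hsh
  apply gridExt lx.toNat ly.toNat
  · exact bSweep_len lx ly maze s dis k
  · exact hlen
  · exact bSweep_rows lx ly maze s dis k
  · intro r hr
    simpa using hrows r hr
  · intro x hx y hy
    rw [bCell_sweep lx ly maze s dis k x y hx hy, if_neg (by simp [h x hx y hy])]

theorem bMeasure_dec (lx ly : Int) (maze : List String) (s : Int × Int)
    (dis : List (List Int)) (k : Nat) (hne : bSweep lx ly maze s dis k ≠ dis) :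
    bMeasure lx ly (bSweep lx ly maze s dis k) < bMeasure lx ly dis := by
  by_cases hex : ∃ x, x < lx.toNat ∧ ∃ y, y < ly.toNat ∧ bCond lx ly maze s dis k x y = true
  · obtain ⟨x, hx, y, hy, hc⟩ := hex
    have hlt := bWin_sweep_lt lx ly maze s dis k x y hx hy hc
    rw [bMeasure, bMeasure]
    have : (if bShape lx ly (bSweep lx ly maze s dis k) then 0 else 1) = 0 := by
      rw [bShape_sweep]
      rfl
    rw [this]
    split <;> omega
  · push_neg at hex
    have hall : ∀ x, x < lx.toNat → ∀ y, y < ly.toNat → bCond lx ly maze s dis k x y = false := by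
      intro x hx y hy
      by_contra hc
      exact absurd (by simpa using hc) (by simpa using hex x hx y hy)
    have hshape : bShape lx ly dis = false := by
      by_contra hc
      have : bShape lx ly dis = true := by simpa using hc
      exact hne (bSweep_eq_self lx ly maze s dis k this hall)
    have hwin : bWin lx ly (bSweep lx ly maze s dis k) = bWin lx ly dis := by
      apply Finset.sum_congr rfl
      intro x hxm
      have hx := Finset.mem_range.1 hxm
      apply List.countP_congr
      intro y hym
      have hy := List.mem_range.1 hym
      rw [bCell_sweep lx ly maze s dis k x y hx hy, if_neg (by simp [hall x hx y hy])]
    rw [bMeasure, bMeasure, hwin, hshape, bShape_sweep]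
    simp

-- B's 'while True: new = sweep; if new == dis: break; dis = new; k += 1'
def bLoop (lx ly : Int) (maze : List String) (s : Int × Int) (dis : List (List Int))
    (k : Nat) : List (List Int) :=
  let new := bSweep lx ly maze s dis k
  if new = dis then dis
  else bLoop lx ly maze s new (k + 1)
termination_by bMeasure lx ly dis
decreasing_by exact bMeasure_dec lx ly maze s dis k (by assumption)

def dfs_alt (maze : List String) (stone : List (Int × Int)) : List (List (List Int)) :=
  let lx : Int := maze.length
  let ly : Int := (maze.headD "").length
  stone.map (fun s =>
    bLoop lx ly maze s
      (List.replicate maze.length (List.replicate (maze.headD "").length (-1))) 1)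

-- ===== PRECONDITION & SPEC =====
-- Pre_ excludes the empty maze (maze[0] raises IndexError) and ragged mazes whose rows are
-- shorter than the first row, on which A's maze[nx][ny] can raise IndexError; walls can keep
-- some such ragged mazes from raising, those returning inputs are conservatively excluded too.
def Pre_dfs (maze : List String) (stone : List (Int × Int)) : Prop :=
  maze ≠ [] ∧ ∀ s ∈ maze, (maze.headD "").length ≤ s.length

instance (maze : List String) (stone : List (Int × Int)) : Decidable (Pre_dfs maze stone) := by
  unfold Pre_dfs; infer_instance

def pvWitness_dfs : List String × (List (Int × Int)) := (["..", ".#"], [(0, 0)])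

def Spec_dfs (maze : List String) (stone : List (Int × Int)) (out : List (List (List Int))) : Prop := out = dfs_alt maze stone
instance (maze : List String) (stone : List (Int × Int)) (out : List (List (List Int))) : Decidable (Spec_dfs maze stone out) := by unfold Spec_dfs; infer_instance

-- ===== CLAIM (what is proved, stated in full; the proofs are below) =====
def Claim_equal_dfs : Prop := ∀ (maze : List String) (stone : List (Int × Int)), Dom_dfs maze stone → Pre_dfs maze stone → Spec_dfs maze stone (dfs maze stone)

-- ===== LEMMAS AND PROOFS =====
def aCand (next : List (Int × Int)) : List (Int × Int) :=
  next.flatMap (fun t => pvDirs.map (fun d => (t.1 + d.1, t.2 + d.2)))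
def aStep (lx ly : Int) (maze : List String) (v : Int)
    (st : List (List Int) × List (Int × Int)) (c : Int × Int) :
    List (List Int) × List (Int × Int) :=
  if 0 ≤ c.1 ∧ c.1 < lx ∧ 0 ≤ c.2 ∧ c.2 < ly ∧ pvGet st.1 c.1 c.2 = -1 ∧ pvMazeGet maze c.1 c.2 ≠ '#'
  then (pvSet st.1 c.1 c.2 v, st.2 ++ [c])
  else st
theorem pvGet_cast (g : List (List Int)) (x y : Nat) : pvGet g ↑x ↑y = bCell g x y := by
  simp [pvGet, bCell]
theorem pvSet_length (g : List (List Int)) (x y : Int) (v : Int) :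
    (pvSet g x y v).length = g.length := by
  simp [pvSet]
theorem pvSet_rows (g : List (List Int)) (x y : Int) (v : Int) (m : Nat)
    (hr : ∀ r ∈ g, r.length = m) (hx : x.toNat < g.length) :
    ∀ r ∈ pvSet g x y v, r.length = m := by
  intro r hr'
  rw [pvSet] at hr'
  rcases List.mem_or_eq_of_mem_set hr' with h | h
  · exact hr _ h
  · subst h
    rw [List.length_set, List.getD_eq_getElem?_getD, List.getElem?_eq_getElem hx]
    exact hr _ (List.getElem_mem hx)
theorem pvGet_set_self (g : List (List Int)) (x y : Int) (v : Int)
    (hx : x.toNat < g.length) :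
    (g.getD x.toNat []).length > y.toNat → pvGet (pvSet g x y v) x y = v := by
  intro hy
  simp only [pvGet, pvSet, List.getD_eq_getElem?_getD]
  rw [List.getElem?_set_self (by simpa using hx)]
  simp only [Option.getD_some]
  rw [List.getElem?_set_self (by simpa using hy)]
  rfl
theorem pvGet_set_ne (g : List (List Int)) (a b x y : Int) (v : Int)
    (h : ¬(x.toNat = a.toNat ∧ y.toNat = b.toNat)) :
    pvGet (pvSet g a b v) x y = pvGet g x y := by
  simp only [pvGet, pvSet, List.getD_eq_getElem?_getD]
  by_cases hxa : x.toNat = a.toNat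
  · have hy : y.toNat ≠ b.toNat := fun hc => h ⟨hxa, hc⟩
    rw [hxa]
    by_cases hlt : a.toNat < g.length
    · rw [List.getElem?_set_self (by simpa using hlt), Option.getD_some,
        List.getElem?_eq_getElem hlt, Option.getD_some,
        List.getElem?_set_ne (by omega)]
    · rw [List.set_eq_of_length_le (by omega)]
  · rw [List.getElem?_set_ne (by omega)]
def fCond (lx ly : Int) (maze : List String) (g : List (List Int))
    (L : List (Int × Int)) (c : Int × Int) : Prop :=
  0 ≤ c.1 ∧ c.1 < lx ∧ 0 ≤ c.2 ∧ c.2 < ly ∧ pvGet g c.1 c.2 = -1 ∧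
    pvMazeGet maze c.1 c.2 ≠ '#' ∧ c ∈ L
theorem fCond_cons_not (lx ly : Int) (maze : List String) (g : List (List Int))
    (L : List (Int × Int)) (c c' : Int × Int)
    (hc : ¬(0 ≤ c.1 ∧ c.1 < lx ∧ 0 ≤ c.2 ∧ c.2 < ly ∧ pvGet g c.1 c.2 = -1 ∧ pvMazeGet maze c.1 c.2 ≠ '#')) :
    fCond lx ly maze g (c :: L) c' ↔ fCond lx ly maze g L c' := by
  unfold fCond
  constructor
  · rintro ⟨h1, h2, h3, h4, h5, h6, h7⟩
    rcases List.mem_cons.1 h7 with rfl | h7'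
    · exact absurd ⟨h1, h2, h3, h4, h5, h6⟩ hc
    · exact ⟨h1, h2, h3, h4, h5, h6, h7'⟩
  · rintro ⟨h1, h2, h3, h4, h5, h6, h7⟩
    exact ⟨h1, h2, h3, h4, h5, h6, List.mem_cons_of_mem _ h7⟩

theorem aFold_char (lx ly : Int) (maze : List String) (v : Int) (hv : v ≠ -1) :
    ∀ (L : List (Int × Int)) (g : List (List Int)) (temp : List (Int × Int)),
      g.length = lx.toNat → (∀ r ∈ g, r.length = ly.toNat) →
      (L.foldl (aStep lx ly maze v) (g, temp)).1.length = lx.toNat ∧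
      (∀ r ∈ (L.foldl (aStep lx ly maze v) (g, temp)).1, r.length = ly.toNat) ∧
      (∀ x y : Nat, x < lx.toNat → y < ly.toNat →
        (fCond lx ly maze g L ((x : Int), (y : Int)) →
          pvGet (L.foldl (aStep lx ly maze v) (g, temp)).1 ↑x ↑y = v) ∧
        (¬ fCond lx ly maze g L ((x : Int), (y : Int)) →
          pvGet (L.foldl (aStep lx ly maze v) (g, temp)).1 ↑x ↑y = pvGet g ↑x ↑y)) ∧
      (∀ c : Int × Int, c ∈ (L.foldl (aStep lx ly maze v) (g, temp)).2 ↔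
        c ∈ temp ∨ fCond lx ly maze g L c) := by
  intro L
  induction L with
  | nil =>
    intro g temp hlen hrows
    refine ⟨hlen, hrows, ?_, ?_⟩
    · intro x y hx hy
      refine ⟨?_, fun _ => rfl⟩
      intro hf
      exact absurd hf.2.2.2.2.2.2 (by simp)
    · intro c
      simp [fCond]
  | cons c L ih =>
    intro g temp hlen hrows
    rw [List.foldl_cons]
    rw [aStep]
    by_cases hc : 0 ≤ c.1 ∧ c.1 < lx ∧ 0 ≤ c.2 ∧ c.2 < ly ∧ pvGet g c.1 c.2 = -1 ∧ pvMazeGet maze c.1 c.2 ≠ '#'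
    · rw [if_pos hc]
      obtain ⟨hc1, hc2, hc3, hc4, hc5, hc6⟩ := hc
      have hxN : c.1.toNat < g.length := by omega
      have hyN : c.2.toNat < (g.getD c.1.toNat []).length := by
        have := hrows (g.getD c.1.toNat []) (by
          rw [List.getD_eq_getElem?_getD, List.getElem?_eq_getElem hxN]
          exact List.getElem_mem hxN)
        omega
      have hlen' : (pvSet g c.1 c.2 v).length = lx.toNat := by
        rw [pvSet_length]; exact hlen
      have hrows' := pvSet_rows g c.1 c.2 v ly.toNat hrows hxN
      obtain ⟨ih1, ih2, ih3, ih4⟩ := ih (pvSet g c.1 c.2 v) (temp ++ [c]) hlen' hrows'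
      have hget_self : pvGet (pvSet g c.1 c.2 v) c.1 c.2 = v :=
        pvGet_set_self g c.1 c.2 v hxN (by omega)
      have hget_ne : ∀ (a b : Int), ¬(a.toNat = c.1.toNat ∧ b.toNat = c.2.toNat) →
          pvGet (pvSet g c.1 c.2 v) a b = pvGet g a b := fun a b h =>
        pvGet_set_ne g c.1 c.2 a b v h
      refine ⟨ih1, ih2, ?_, ?_⟩
      · intro x y hx hy
        obtain ⟨ihA, ihB⟩ := ih3 x y hx hy
        by_cases hxy : (x : Int) = c.1 ∧ (y : Int) = c.2
        · obtain ⟨he1, he2⟩ := hxy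
          have hgv : pvGet (pvSet g c.1 c.2 v) ↑x ↑y = v := by rw [he1, he2]; exact hget_self
          have hnf : ¬ fCond lx ly maze (pvSet g c.1 c.2 v) L ((x : Int), (y : Int)) := by
            rintro ⟨_, _, _, _, h5, _, _⟩
            rw [hgv] at h5
            exact hv h5
          constructor
          · intro _
            rw [ihB hnf, hgv]
          · intro hnf'
            exfalso
            apply hnf'
            refine ⟨by omega, by omega, by omega, by omega, ?_, ?_,
              List.mem_cons.2 (Or.inl (Prod.ext he1 he2))⟩
            · rw [he1, he2]; exact hc5
            · rw [he1, he2]; exact hc6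
        · have hne : ¬((x : Nat) = c.1.toNat ∧ (y : Nat) = c.2.toNat) := by omega
          have hgne : pvGet (pvSet g c.1 c.2 v) ↑x ↑y = pvGet g ↑x ↑y := by
            apply hget_ne
            simpa using hne
          have hmem : ((((x : Int), (y : Int)) : Int × Int) ∈ c :: L) ↔ ((((x : Int), (y : Int)) : Int × Int) ∈ L) := by
            rw [List.mem_cons]
            constructor
            · rintro (he | h)
              · exact absurd ⟨congrArg Prod.fst he, congrArg Prod.snd he⟩ hxy
              · exact h
            · exact Or.inr
          have hcond_iff : fCond lx ly maze (pvSet g c.1 c.2 v) L ((x:Int), (y:Int))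
              ↔ fCond lx ly maze g (c :: L) ((x:Int), (y:Int)) := by
            unfold fCond
            rw [hmem]
            simp only [hgne]
          constructor
          · intro hf
            rw [ihA (hcond_iff.2 hf)]
          · intro hnf
            rw [ihB (fun h => hnf (hcond_iff.1 h))]
            exact hgne
      · intro c'
        rw [ih4 c']
        rw [List.mem_append]
        constructor
        · rintro ((h | h) | h)
          · exact Or.inl h
          · right
            rw [List.mem_singleton] at h
            subst h
            exact ⟨hc1, hc2, hc3, hc4, hc5, hc6, List.mem_cons_self⟩
          · right
            obtain ⟨h1, h2, h3, h4, h5, h6, h7⟩ := h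
            by_cases he : c' = c
            · subst he
              exact ⟨hc1, hc2, hc3, hc4, hc5, hc6, List.mem_cons_self⟩
            · have hne : ¬(c'.1.toNat = c.1.toNat ∧ c'.2.toNat = c.2.toNat) := by
                intro hcc
                apply he
                have hcx : c'.1 = c.1 ∧ c'.2 = c.2 := by omega
                exact Prod.ext hcx.1 hcx.2
              rw [hget_ne c'.1 c'.2 hne] at h5
              exact ⟨h1, h2, h3, h4, h5, h6, List.mem_cons_of_mem _ h7⟩
        · rintro (h | h)
          · exact Or.inl (Or.inl h)
          · obtain ⟨h1, h2, h3, h4, h5, h6, h7⟩ := h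
            rcases List.mem_cons.1 h7 with rfl | h7'
            · exact Or.inl (Or.inr (List.mem_singleton.2 rfl))
            · by_cases he : c' = c
              · subst he
                exact Or.inl (Or.inr (List.mem_singleton.2 rfl))
              · have hne : ¬(c'.1.toNat = c.1.toNat ∧ c'.2.toNat = c.2.toNat) := by
                  intro hcc
                  apply he
                  have hcx : c'.1 = c.1 ∧ c'.2 = c.2 := by omega
                  exact Prod.ext hcx.1 hcx.2
                exact Or.inr ⟨h1, h2, h3, h4,
                  by rw [hget_ne c'.1 c'.2 hne]; exact h5, h6, h7'⟩
    · rw [if_neg hc]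
      obtain ⟨ih1, ih2, ih3, ih4⟩ := ih g temp hlen hrows
      refine ⟨ih1, ih2, ?_, ?_⟩
      · intro x y hx hy
        obtain ⟨ihA, ihB⟩ := ih3 x y hx hy
        rw [fCond_cons_not lx ly maze g L c _ hc]
        exact ⟨ihA, ihB⟩
      · intro c'
        rw [ih4 c', fCond_cons_not lx ly maze g L c c' hc]
theorem expand_eq_aStep (lx ly : Int) (maze : List String) (v : Int) (t : Int × Int)
    (st : List (List Int) × List (Int × Int)) :
    pvExpand lx ly maze v t st
      = (pvDirs.map (fun d => (t.1 + d.1, t.2 + d.2))).foldl (aStep lx ly maze v) st := by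
  rw [pvExpand, List.foldl_map]
  rfl

theorem level_eq_cand (lx ly : Int) (maze : List String) (v : Int) :
    ∀ (next : List (Int × Int)) (st : List (List Int) × List (Int × Int)),
      next.foldl (fun st t => pvExpand lx ly maze v t st) st
        = (aCand next).foldl (aStep lx ly maze v) st := by
  intro next
  induction next with
  | nil => intro st; rfl
  | cons t next ih =>
    intro st
    rw [List.foldl_cons, ih]
    conv_rhs => rw [aCand, List.flatMap_cons, List.foldl_append]
    rw [expand_eq_aStep]
    rfl

theorem mem_aCand (next : List (Int × Int)) (c : Int × Int) :
    c ∈ aCand next ↔ ∃ t ∈ next, ∃ d ∈ pvDirs, c = (t.1 + d.1, t.2 + d.2) := by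
  simp [aCand, List.mem_flatMap, List.mem_map, eq_comm]

theorem dirSym (x y : Int) (t : Int × Int) :
    (∃ d ∈ pvDirs, x = t.1 + d.1 ∧ y = t.2 + d.2) ↔
    (∃ d ∈ bDirs, t.1 = x + d.1 ∧ t.2 = y + d.2) := by
  simp [pvDirs, bDirs]
  omega

theorem bMazeCell_cast (maze : List String) (x y : Nat) :
    pvMazeGet maze ↑x ↑y = bMazeCell maze x y := by
  simp [pvMazeGet, bMazeCell]

theorem bCellI_eq (dis : List (List Int)) (x y : Int) : bCellI dis x y = pvGet dis x y := rfl

theorem bCond_iff (lx ly : Int) (maze : List String) (s : Int × Int) (dis : List (List Int))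
    (k : Nat) (x y : Nat) :
    bCond lx ly maze s dis k x y = true ↔
      (bCell dis x y = -1 ∧ bMazeCell maze x y ≠ '#' ∧
       ∃ d ∈ bDirs, ((k = 1 ∧ (x : Int) + d.1 = s.1 ∧ (y : Int) + d.2 = s.2) ∨
          (0 ≤ (x : Int) + d.1 ∧ (x : Int) + d.1 < lx ∧ 0 ≤ (y : Int) + d.2 ∧ (y : Int) + d.2 < ly ∧
           bCellI dis ((x : Int) + d.1) ((y : Int) + d.2) = (k : Int) - 1))) := by
  rw [bCond]
  simp only [Bool.and_eq_true, beq_iff_eq, bne_iff_ne, List.any_eq_true, Bool.or_eq_true,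
    decide_eq_true_eq, and_assoc]

theorem cond_bridge (lx ly : Int) (maze : List String) (s : Int × Int) (k : Nat) (hk : 1 ≤ k)
    (g : List (List Int)) (next : List (Int × Int))
    (hnext : ∀ c : Int × Int, c ∈ next ↔
      (0 ≤ c.1 ∧ c.1 < lx ∧ 0 ≤ c.2 ∧ c.2 < ly ∧ pvGet g c.1 c.2 = (k : Int)))
    (x y : Nat) (hx : x < lx.toNat) (hy : y < ly.toNat) :
    (fCond lx ly maze g (aCand next) ((x : Int), (y : Int)) ↔
      bCond lx ly maze s g (k + 1) x y = true) := by
  rw [bCond_iff]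
  unfold fCond
  have hb1 : (0 : Int) ≤ (x : Int) := by omega
  have hb2 : (x : Int) < lx := by omega
  have hb3 : (0 : Int) ≤ (y : Int) := by omega
  have hb4 : (y : Int) < ly := by omega
  rw [pvGet_cast, bMazeCell_cast]
  constructor
  · rintro ⟨_, _, _, _, h5, h6, h7⟩
    refine ⟨h5, h6, ?_⟩
    rw [mem_aCand] at h7
    obtain ⟨t, ht, hd⟩ := h7
    have hd' : ∃ d ∈ pvDirs, (x : Int) = t.1 + d.1 ∧ (y : Int) = t.2 + d.2 := by
      obtain ⟨d, hdm, hde⟩ := hd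
      exact ⟨d, hdm, congrArg Prod.fst hde, congrArg Prod.snd hde⟩
    rw [dirSym] at hd'
    obtain ⟨d, hdm, he1, he2⟩ := hd'
    refine ⟨d, hdm, Or.inr ?_⟩
    obtain ⟨hn1, hn2, hn3, hn4, hn5⟩ := (hnext t).1 ht
    rw [he1] at hn1 hn2 hn5
    rw [he2] at hn3 hn4 hn5
    refine ⟨hn1, hn2, hn3, hn4, ?_⟩
    rw [bCellI_eq, hn5]
    push_cast
    ring
  · rintro ⟨h5, h6, d, hdm, hd⟩
    rcases hd with ⟨hk1, _⟩ | ⟨hu1, hu2, hu3, hu4, hu5⟩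
    · omega
    · refine ⟨hb1, hb2, hb3, hb4, h5, h6, ?_⟩
      rw [mem_aCand]
      refine ⟨((x : Int) + d.1, (y : Int) + d.2), ?_, ?_⟩
      · rw [hnext]
        refine ⟨hu1, hu2, hu3, hu4, ?_⟩
        rw [← bCellI_eq, hu5]
        push_cast
        ring
      · have hsym : ∃ dd ∈ pvDirs, (x : Int) = ((x : Int) + d.1) + dd.1 ∧
            (y : Int) = ((y : Int) + d.2) + dd.2 := by
          rw [dirSym ((x : Int)) ((y : Int)) (((x : Int) + d.1, (y : Int) + d.2))]
          exact ⟨d, hdm, rfl, rfl⟩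
        obtain ⟨dd, hddm, hh1, hh2⟩ := hsym
        exact ⟨dd, hddm, Prod.ext hh1 hh2⟩

theorem cond_bridge1 (lx ly : Int) (maze : List String) (s : Int × Int)
    (g : List (List Int))
    (hall : ∀ x y : Nat, x < lx.toNat → y < ly.toNat → pvGet g ↑x ↑y = -1)
    (x y : Nat) (hx : x < lx.toNat) (hy : y < ly.toNat) :
    (fCond lx ly maze g (aCand [s]) ((x : Int), (y : Int)) ↔
      bCond lx ly maze s g 1 x y = true) := by
  rw [bCond_iff]
  unfold fCond
  rw [pvGet_cast, bMazeCell_cast]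
  constructor
  · rintro ⟨_, _, _, _, h5, h6, h7⟩
    refine ⟨h5, h6, ?_⟩
    rw [mem_aCand] at h7
    obtain ⟨t, ht, hd⟩ := h7
    rw [List.mem_singleton] at ht
    subst ht
    have hd' : ∃ d ∈ pvDirs, (x : Int) = t.1 + d.1 ∧ (y : Int) = t.2 + d.2 := by
      obtain ⟨d, hdm, hde⟩ := hd
      exact ⟨d, hdm, congrArg Prod.fst hde, congrArg Prod.snd hde⟩
    rw [dirSym] at hd'
    obtain ⟨d, hdm, he1, he2⟩ := hd'
    exact ⟨d, hdm, Or.inl ⟨rfl, he1.symm, he2.symm⟩⟩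
  · rintro ⟨h5, h6, d, hdm, hd⟩
    rcases hd with ⟨_, he1, he2⟩ | ⟨hu1, hu2, hu3, hu4, hu5⟩
    · refine ⟨by omega, by omega, by omega, by omega, h5, h6, ?_⟩
      rw [mem_aCand]
      refine ⟨s, List.mem_singleton.2 rfl, ?_⟩
      have hsym : ∃ dd ∈ pvDirs, (x : Int) = s.1 + dd.1 ∧ (y : Int) = s.2 + dd.2 := by
        rw [dirSym ((x : Int)) ((y : Int)) s]
        exact ⟨d, hdm, he1.symm, he2.symm⟩
      obtain ⟨dd, hddm, hh1, hh2⟩ := hsym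
      exact ⟨dd, hddm, Prod.ext hh1 hh2⟩
    · exfalso
      have hxu : ((x : Int) + d.1).toNat < lx.toNat := by omega
      have hyu : ((y : Int) + d.2).toNat < ly.toNat := by omega
      have h0 := hall ((x : Int) + d.1).toNat ((y : Int) + d.2).toNat hxu hyu
      rw [bCellI_eq] at hu5
      rw [pvGet] at h0 hu5
      simp only [Int.toNat_natCast] at h0
      rw [h0] at hu5
      omega

-- ---------- the main loop equivalence ----------

theorem loop_eq (lx ly : Int) (maze : List String) (s : Int × Int) :
    ∀ n : Nat, ∀ (g : List (List Int)) (next : List (Int × Int)) (k : Nat),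
      bWin lx ly g = n → 1 ≤ k →
      g.length = lx.toNat → (∀ r ∈ g, r.length = ly.toNat) →
      (∀ x y : Nat, x < lx.toNat → y < ly.toNat →
         pvGet g ↑x ↑y = -1 ∨ (1 ≤ pvGet g ↑x ↑y ∧ pvGet g ↑x ↑y ≤ (k : Int) - 1)) →
      (∀ x y : Nat, x < lx.toNat → y < ly.toNat →
         (fCond lx ly maze g (aCand next) ((x : Int), (y : Int)) ↔
           bCond lx ly maze s g k x y = true)) →
      dfsLoop lx ly maze g next k = bLoop lx ly maze s g k := by
  intro n
  induction n using Nat.strong_induction_on with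
  | _ n ih =>
    intro g next k hn hk hlen hrows hvals hcond
    have hv : ((k : Int)) ≠ -1 := by omega
    obtain ⟨h1, h2, h3, h4⟩ := aFold_char lx ly maze (k : Int) hv (aCand next) g [] hlen hrows
    have hlevel : dfsLevel lx ly maze k g next
        = (aCand next).foldl (aStep lx ly maze (k : Int)) (g, []) :=
      level_eq_cand lx ly maze (k : Int) next (g, [])
    have hshape : bShape lx ly g = true := by
      rw [bShape, Bool.and_eq_true, beq_iff_eq, List.all_eq_true]
      exact ⟨hlen, fun r hr => by simpa using hrows r hr⟩
    have hgrid : ((aCand next).foldl (aStep lx ly maze (k : Int)) (g, [])).1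
        = bSweep lx ly maze s g k := by
      apply gridExt lx.toNat ly.toNat _ _ h1 (bSweep_len lx ly maze s g k) h2
        (bSweep_rows lx ly maze s g k)
      intro x hx y hy
      rw [← pvGet_cast, bCell_sweep lx ly maze s g k x y hx hy]
      by_cases hf : fCond lx ly maze g (aCand next) ((x : Int), (y : Int))
      · rw [(h3 x y hx hy).1 hf, if_pos ((hcond x y hx hy).1 hf)]
      · rw [(h3 x y hx hy).2 hf, if_neg (fun hb => hf ((hcond x y hx hy).2 hb)), pvGet_cast]
    by_cases hT : ((aCand next).foldl (aStep lx ly maze (k : Int)) (g, [])).2 = []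
    · -- no cell is set this round: both loops stop at g
      have hnc : ∀ c : Int × Int, ¬ fCond lx ly maze g (aCand next) c := by
        intro c hf
        have := (h4 c).2 (Or.inr hf)
        rw [hT] at this
        simp at this
      have hbc : ∀ x, x < lx.toNat → ∀ y, y < ly.toNat →
          bCond lx ly maze s g k x y = false := by
        intro x hx y hy
        by_contra hcc
        have hcc' : bCond lx ly maze s g k x y = true := by simpa using hcc
        exact hnc _ ((hcond x y hx hy).2 hcc')
      have hSg : bSweep lx ly maze s g k = g := bSweep_eq_self lx ly maze s g k hshape hbc
      have hB : bLoop lx ly maze s g k = g := by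
        rw [bLoop]
        simp [hSg]
      have hPg : ((aCand next).foldl (aStep lx ly maze (k : Int)) (g, [])).1 = g :=
        hgrid.trans hSg
      rw [hB]
      by_cases hne : next = []
      · rw [dfsLoop, dif_pos hne]
      · rw [dfsLoop, dif_neg hne]
        simp only [dfsLevel] at *
        rw [level_eq_cand lx ly maze (k : Int) next (g, [])]
        rw [hPg, hT, dfsLoop, dif_pos rfl]
    · -- some cell is set: both loops advance to the same grid
      obtain ⟨c, hc⟩ := List.exists_mem_of_ne_nil _ hT
      have hfc : fCond lx ly maze g (aCand next) c := by
        rcases (h4 c).1 hc with h | h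
        · simp at h
        · exact h
      obtain ⟨hf1, hf2, hf3, hf4, hf5, hf6, hf7⟩ := hfc
      have hxw : c.1.toNat < lx.toNat := by omega
      have hyw : c.2.toNat < ly.toNat := by omega
      have hcc : ((c.1.toNat : Int), (c.2.toNat : Int)) = c := by
        apply Prod.ext <;> simp <;> omega
      have hbcond : bCond lx ly maze s g k c.1.toNat c.2.toNat = true := by
        apply (hcond c.1.toNat c.2.toNat hxw hyw).1
        rw [hcc]
        exact ⟨hf1, hf2, hf3, hf4, hf5, hf6, hf7⟩
      have hSne : bSweep lx ly maze s g k ≠ g := by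
        intro he
        have h5' : bCell g c.1.toNat c.2.toNat = -1 := by
          rw [← pvGet_cast]
          rw [hcc.symm] at hf5
          exact hf5
        have := bCell_sweep lx ly maze s g k c.1.toNat c.2.toNat hxw hyw
        rw [he, if_pos hbcond, h5'] at this
        omega
      have hnextne : next ≠ [] := by
        rintro rfl
        simp [aCand] at hf7
      -- the frontier for the next round is exactly the cells holding value k
      have hnext' : ∀ c' : Int × Int,
          c' ∈ ((aCand next).foldl (aStep lx ly maze (k : Int)) (g, [])).2 ↔
          (0 ≤ c'.1 ∧ c'.1 < lx ∧ 0 ≤ c'.2 ∧ c'.2 < ly ∧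
            pvGet (bSweep lx ly maze s g k) c'.1 c'.2 = (k : Int)) := by
        intro c'
        rw [h4 c']
        constructor
        · rintro (h | h)
          · simp at h
          · obtain ⟨g1, g2, g3, g4, g5, g6, g7⟩ := h
            refine ⟨g1, g2, g3, g4, ?_⟩
            rw [← hgrid]
            have hxw' : c'.1.toNat < lx.toNat := by omega
            have hyw' : c'.2.toNat < ly.toNat := by omega
            have hcc' : ((c'.1.toNat : Int), (c'.2.toNat : Int)) = c' := by
              apply Prod.ext <;> simp <;> omega
            have h3' := (h3 c'.1.toNat c'.2.toNat hxw' hyw').1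
            have he1 : ((c'.1.toNat : Nat) : Int) = c'.1 := by omega
            have he2 : ((c'.2.toNat : Nat) : Int) = c'.2 := by omega
            rw [he1, he2, Prod.mk.eta] at h3'
            exact h3' ⟨g1, g2, g3, g4, g5, g6, g7⟩
        · rintro ⟨g1, g2, g3, g4, g5⟩
          right
          have hxw' : c'.1.toNat < lx.toNat := by omega
          have hyw' : c'.2.toNat < ly.toNat := by omega
          have hcc' : ((c'.1.toNat : Int), (c'.2.toNat : Int)) = c' := by
            apply Prod.ext <;> simp <;> omega
          have h3' := (h3 c'.1.toNat c'.2.toNat hxw' hyw').2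
          have he1 : ((c'.1.toNat : Nat) : Int) = c'.1 := by omega
          have he2 : ((c'.2.toNat : Nat) : Int) = c'.2 := by omega
          rw [he1, he2, Prod.mk.eta] at h3'
          rw [← hgrid] at g5
          by_cases hf : fCond lx ly maze g (aCand next) c'
          · exact hf
          · exfalso
            rw [h3' hf] at g5
            have hvv := hvals c'.1.toNat c'.2.toNat hxw' hyw'
            rw [he1, he2] at hvv
            rcases hvv with h | h <;> omega
      rw [dfsLoop, dif_neg hnextne]
      simp only [dfsLevel] at *
      conv_lhs => rw [level_eq_cand lx ly maze (k : Int) next (g, [])]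
      rw [hgrid]
      rw [bLoop]
      rw [if_neg hSne]
      apply ih (bWin lx ly (bSweep lx ly maze s g k))
        (by rw [← hn]; exact bWin_sweep_lt lx ly maze s g k c.1.toNat c.2.toNat hxw hyw hbcond)
        _ _ (k + 1) rfl (by omega) (bSweep_len lx ly maze s g k) (bSweep_rows lx ly maze s g k)
      · -- values of the new grid are -1 or in [1, k]
        intro x y hx hy
        rw [pvGet_cast, bCell_sweep lx ly maze s g k x y hx hy]
        by_cases hb : bCond lx ly maze s g k x y = true
        · rw [if_pos hb]
          right
          constructor
          · omega
          · push_cast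
            omega
        · rw [if_neg hb, ← pvGet_cast]
          rcases hvals x y hx hy with h | h
          · exact Or.inl h
          · right
            refine ⟨h.1, ?_⟩
            push_cast
            omega
      · -- the new condition equivalence, via cond_bridge
        intro x y hx hy
        exact cond_bridge lx ly maze s k hk (bSweep lx ly maze s g k) _ hnext' x y hx hy

-- ---------- top-level assembly ----------

theorem bCell_replicate (n m : Nat) (v : Int) (x y : Nat) (hx : x < n) (hy : y < m) :
    bCell (List.replicate n (List.replicate m v)) x y = v := by
  simp [bCell, List.getD_eq_getElem?_getD, List.getElem?_replicate, hx, hy]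

theorem per_stone (maze : List String) (i : Int × Int) :
    dfsLoop (maze.length : Int) ((maze.headD "").length : Int) maze
      (List.replicate maze.length (List.replicate (maze.headD "").length (-1))) [i] 1
    = bLoop (maze.length : Int) ((maze.headD "").length : Int) maze i
      (List.replicate maze.length (List.replicate (maze.headD "").length (-1))) 1 := by
  have hall : ∀ x y : Nat, x < ((maze.length : Int)).toNat → y < (((maze.headD "").length : Int)).toNat →
      pvGet (List.replicate maze.length (List.replicate (maze.headD "").length (-1))) ↑x ↑y = -1 := by
    intro x y hx hy
    rw [pvGet_cast]
    exact bCell_replicate _ _ _ x y (by simpa using hx) (by simpa using hy)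
  apply loop_eq (maze.length : Int) ((maze.headD "").length : Int) maze i
    (bWin (maze.length : Int) ((maze.headD "").length : Int)
      (List.replicate maze.length (List.replicate (maze.headD "").length (-1))))
    _ _ 1 rfl (le_refl 1)
  · simp
  · intro r hr
    rw [List.eq_of_mem_replicate hr]
    simp
  · intro x y hx hy
    exact Or.inl (hall x y hx hy)
  · intro x y hx hy
    exact cond_bridge1 (maze.length : Int) ((maze.headD "").length : Int) maze i _ hall x y hx hy

theorem foldl_append_eq_map {α β : Type} (f : α → β) :
    ∀ (l : List α) (res : List β), l.foldl (fun r i => r ++ [f i]) res = res ++ l.map f := by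
  intro l
  induction l with
  | nil => intro res; simp
  | cons a l ih =>
    intro res
    rw [List.foldl_cons, ih, List.map_cons]
    simp



-- ===== VERDICT (by name: the statement is the Claim_ definition above) =====
theorem dfs_spec : Claim_equal_dfs := by
  intro maze stone _ _
  unfold Spec_dfs dfs dfs_alt
  rw [foldl_append_eq_map]
  simp only [List.nil_append]
  apply List.map_congr_left
  intro i _
  exact per_stone maze i
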